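-- pv_equiv track=rewrite | github.com/nangman9203-ux/els-monitor | els_core.py | get_sorted_unique_autocall_dates
-- ===== SOURCE A (Python) =====
-- def get_sorted_unique_autocall_dates(strike_date, autocall_dates):
--     if not strike_date or not autocall_dates: return []
--     seen, cleaned = set(), []
--     for d in autocall_dates:
--         if d <= strike_date or d in seen: continue
--         seen.add(d); cleaned.append(d)
--     cleaned.sort()
--     return cleaned
-- ===== SOURCE B (Python) =====
-- def get_sorted_unique_autocall_dates(strike_date, autocall_dates):
--     if not strike_date or not autocall_dates: return []
--     filtered = [d for d in autocall_dates if d > strike_date]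
--     filtered.sort()
--     result, prev = [], None
--     for d in filtered:
--         if d != prev:
--             result.append(d)
--             prev = d
--     return result
-- ===== Notes on version B (the rewrite author's own statement) =====
-- stated objective: alternative
-- what changed: Instead of deduplicating with a 'seen' set while scanning and sorting afterwards, B filters everything after the strike date, sorts the multiset, and removes duplicates in one linear pass that only remembers the last kept value.
import Mathlib
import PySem

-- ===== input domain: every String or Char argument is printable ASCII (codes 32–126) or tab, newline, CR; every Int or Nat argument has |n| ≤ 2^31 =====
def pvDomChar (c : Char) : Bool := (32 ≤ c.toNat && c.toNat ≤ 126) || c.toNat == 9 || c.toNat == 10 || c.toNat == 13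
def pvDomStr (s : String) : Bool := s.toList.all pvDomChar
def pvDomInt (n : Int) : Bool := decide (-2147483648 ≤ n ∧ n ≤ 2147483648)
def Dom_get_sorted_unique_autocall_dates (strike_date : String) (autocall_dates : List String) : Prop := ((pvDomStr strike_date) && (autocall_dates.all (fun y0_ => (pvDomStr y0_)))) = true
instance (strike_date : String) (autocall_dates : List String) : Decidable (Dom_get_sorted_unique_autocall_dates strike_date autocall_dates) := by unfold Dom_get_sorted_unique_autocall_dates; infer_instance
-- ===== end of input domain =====

-- B replaces A's seen-set scan + final sort by filter, sort, then a linear adjacent-duplicate removal pass (alternative decomposition, same cost).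

-- ===== PORT A =====
def get_sorted_unique_autocall_dates (strike_date : String) (autocall_dates : List String) : List String :=
  if strike_date = "" ∨ autocall_dates = [] then []
  else
    let st := autocall_dates.foldl
      (fun (st : PySem.Set String × List String) d =>
        if d ≤ strike_date ∨ PySem.Set.contains st.1 d = true then st
        else (PySem.Set.add st.1 d, st.2 ++ [d]))
      (PySem.Set.empty, [])
    PySem.List.sorted st.2 (fun x => x) false

-- ===== PORT B =====
def get_sorted_unique_autocall_dates_alt (strike_date : String) (autocall_dates : List String) : List String :=
  if strike_date = "" ∨ autocall_dates = [] then []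
  else
    let filtered := autocall_dates.filter (fun d => strike_date < d)
    let sortedF := PySem.List.sorted filtered (fun x => x) false
    (sortedF.foldl
      (fun (st : List String × Option String) d =>
        if some d ≠ st.2 then (st.1 ++ [d], some d) else st)
      ([], none)).1

-- ===== PRECONDITION & SPEC =====
def Spec_get_sorted_unique_autocall_dates (strike_date : String) (autocall_dates : List String) (out : List String) : Prop := out = get_sorted_unique_autocall_dates_alt strike_date autocall_dates
instance (strike_date : String) (autocall_dates : List String) (out : List String) : Decidable (Spec_get_sorted_unique_autocall_dates strike_date autocall_dates out) := by unfold Spec_get_sorted_unique_autocall_dates; infer_instance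

-- ===== CLAIM (what is proved, stated in full; the proofs are below) =====
def Claim_equal_get_sorted_unique_autocall_dates : Prop := ∀ (strike_date : String) (autocall_dates : List String), Dom_get_sorted_unique_autocall_dates strike_date autocall_dates → Spec_get_sorted_unique_autocall_dates strike_date autocall_dates (get_sorted_unique_autocall_dates strike_date autocall_dates)

-- ===== LEMMAS AND PROOFS =====

-- Adjacent-duplicate removal, the recursive shape of B's final loop.
def goDedup : Option String → List String → List String
  | _, [] => []
  | prev, d :: t => if some d ≠ prev then d :: goDedup (some d) t else goDedup prev t

theorem goDedup_cons (prev : Option String) (d : String) (t : List String) :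
    goDedup prev (d :: t) = if some d ≠ prev then d :: goDedup (some d) t else goDedup prev t := rfl

theorem foldB_eq_goDedup (l : List String) (res : List String) (prev : Option String) :
    (l.foldl (fun (st : List String × Option String) d =>
        if some d ≠ st.2 then (st.1 ++ [d], some d) else st) (res, prev)).1
      = res ++ goDedup prev l := by
  induction l generalizing res prev with
  | nil => simp [goDedup]
  | cons d t ih =>
    rw [List.foldl_cons, goDedup_cons]
    by_cases h : some d = prev
    · rw [if_neg (not_not_intro h), if_neg (not_not_intro h)]
      exact ih res prev
    · rw [if_pos h, if_pos h, ih, List.append_assoc]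
      rfl

theorem goDedup_spec (l : List String) (prev : Option String)
    (hs : l.Pairwise (· ≤ ·))
    (hp : ∀ p, prev = some p → ∀ x ∈ l, p ≤ x) :
    (goDedup prev l).Pairwise (· < ·) ∧ (∀ x, x ∈ goDedup prev l ↔ x ∈ l ∧ some x ≠ prev) := by
  induction l generalizing prev with
  | nil => simp [goDedup]
  | cons d t ih =>
    have hdt : ∀ x ∈ t, d ≤ x := fun x hx => (List.pairwise_cons.mp hs).1 x hx
    have hst : t.Pairwise (· ≤ ·) := (List.pairwise_cons.mp hs).2
    have ih' := ih (some d) hst (by rintro p hpq x hx; injection hpq with hpq; subst hpq; exact hdt x hx)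
    rw [goDedup_cons]
    by_cases h : some d = prev
    · -- skipped: prev = some d
      rw [if_neg (not_not_intro h)]
      subst h
      refine ⟨ih'.1, fun x => ?_⟩
      rw [ih'.2 x]
      constructor
      · rintro ⟨hx, hne⟩; exact ⟨List.mem_cons_of_mem _ hx, hne⟩
      · rintro ⟨hx, hne⟩
        rcases List.mem_cons.mp hx with rfl | hx
        · exact (hne rfl).elim
        · exact ⟨hx, hne⟩
    · -- kept: d :: …
      rw [if_pos h]
      constructor
      · refine List.pairwise_cons.mpr ⟨fun y hy => ?_, ih'.1⟩
        have hy' := (ih'.2 y).mp hy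
        exact lt_of_le_of_ne (hdt y hy'.1) (by simpa [eq_comm] using hy'.2)
      · intro x
        simp only [List.mem_cons, ih'.2 x]
        constructor
        · rintro (rfl | ⟨hx, hne⟩)
          · exact ⟨Or.inl rfl, h⟩
          · refine ⟨Or.inr hx, ?_⟩
            rcases prev with _ | p
            · simp
            · intro hc
              have hxp : x = p := by injection hc
              subst hxp
              have h1 : x ≤ d := hp x rfl d (List.mem_cons_self ..)
              have h2 : d ≤ x := hdt x hx
              exact hne (congrArg some (le_antisymm h1 h2))
        · rintro ⟨rfl | hx, hne⟩
          · exact Or.inl rfl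
          · by_cases hxd : x = d
            · exact Or.inl hxd
            · exact Or.inr ⟨hx, by simpa using hxd⟩

-- Characterisation of A's seen/cleaned loop.
theorem foldA_spec (strike_date : String) (xs : List String) (s : PySem.Set String) (c : List String)
    (hnd : c.Nodup) (hsub : ∀ x ∈ c, x ∈ s) :
    (∀ x, x ∈ (xs.foldl (fun (st : PySem.Set String × List String) d =>
        if d ≤ strike_date ∨ PySem.Set.contains st.1 d = true then st
        else (PySem.Set.add st.1 d, st.2 ++ [d])) (s, c)).2
      ↔ x ∈ c ∨ (x ∈ xs ∧ strike_date < x ∧ x ∉ s)) ∧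
    (xs.foldl (fun (st : PySem.Set String × List String) d =>
        if d ≤ strike_date ∨ PySem.Set.contains st.1 d = true then st
        else (PySem.Set.add st.1 d, st.2 ++ [d])) (s, c)).2.Nodup := by
  induction xs generalizing s c with
  | nil =>
    refine ⟨fun x => ⟨fun hx => Or.inl hx, ?_⟩, hnd⟩
    rintro (hx | ⟨hx, -⟩)
    · exact hx
    · simp at hx
  | cons d t ih =>
    rw [List.foldl_cons]
    by_cases h : d ≤ strike_date ∨ PySem.Set.contains s d = true
    · rw [if_pos h]
      obtain ⟨ihm, ihnd⟩ := ih s c hnd hsub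
      refine ⟨fun x => ?_, ihnd⟩
      rw [ihm x]
      constructor
      · rintro (hx | ⟨hx, hlt, hns⟩)
        · exact Or.inl hx
        · exact Or.inr ⟨List.mem_cons_of_mem _ hx, hlt, hns⟩
      · rintro (hx | ⟨hx, hlt, hns⟩)
        · exact Or.inl hx
        · rcases List.mem_cons.mp hx with rfl | hx
          · rcases h with h | h
            · exact absurd hlt (not_lt.mpr h)
            · exact absurd ((PySem.Set.contains_iff s x).mp h) hns
          · exact Or.inr ⟨hx, hlt, hns⟩
    · rw [if_neg h]
      have hgt : strike_date < d := not_le.mp (fun hc => h (Or.inl hc))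
      have hds : d ∉ s := fun hm => h (Or.inr ((PySem.Set.contains_iff s d).mpr hm))
      have hdc : d ∉ c := fun hm => hds (hsub d hm)
      obtain ⟨ihm, ihnd⟩ := ih (PySem.Set.add s d) (c ++ [d])
        (hnd.append (List.nodup_singleton d) (List.disjoint_singleton.mpr hdc))
        (by intro x hx
            rcases List.mem_append.mp hx with hx | hx
            · exact (PySem.Set.mem_add s d x).mpr (Or.inl (hsub x hx))
            · exact (PySem.Set.mem_add s d x).mpr (Or.inr (by simpa using hx)))
      refine ⟨fun x => ?_, ihnd⟩
      rw [ihm x]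
      simp only [List.mem_append, List.mem_cons, List.not_mem_nil, or_false,
        PySem.Set.mem_add]
      constructor
      · rintro ((hx | rfl) | ⟨hx, hlt, hns⟩)
        · exact Or.inl hx
        · exact Or.inr ⟨Or.inl rfl, hgt, hds⟩
        · exact Or.inr ⟨Or.inr hx, hlt, fun hm => hns (Or.inl hm)⟩
      · rintro (hx | ⟨rfl | hx, hlt, hns⟩)
        · exact Or.inl (Or.inl hx)
        · exact Or.inl (Or.inr rfl)
        · by_cases hxd : x = d
          · exact Or.inl (Or.inr hxd)
          · refine Or.inr ⟨hx, hlt, ?_⟩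
            rintro (hm | hm)
            · exact hns hm
            · exact hxd hm

-- ===== VERDICT (by name: the statement is the Claim_ definition above) =====
theorem get_sorted_unique_autocall_dates_spec : Claim_equal_get_sorted_unique_autocall_dates := by
  intro strike_date autocall_dates _
  unfold Spec_get_sorted_unique_autocall_dates
  unfold get_sorted_unique_autocall_dates get_sorted_unique_autocall_dates_alt
  by_cases hg : strike_date = "" ∨ autocall_dates = []
  · simp [hg]
  · simp only [if_neg hg]
    rw [foldB_eq_goDedup, List.nil_append]
    have hsp : (PySem.List.sorted (autocall_dates.filter (fun d => strike_date < d)) (fun x => x) false).Pairwise (· ≤ ·) :=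
      PySem.List.sorted_pairwise _ (fun x => x)
    obtain ⟨hpw, hmem⟩ := goDedup_spec _ none hsp (by rintro p ⟨⟩)
    obtain ⟨ham, hand⟩ := foldA_spec strike_date autocall_dates PySem.Set.empty []
      List.nodup_nil (by simp [PySem.Set.empty])
    refine PySem.List.sorted_eq_of_perm_of_pairwise_lt _ _ _ ?_ hpw
    refine (List.perm_ext_iff_of_nodup (hpw.imp ne_of_lt) hand).mpr ?_
    intro x
    rw [hmem x, ham x]
    simp [PySem.List.mem_sorted, PySem.Set.empty, List.mem_filter]
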